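-- pv_equiv track=rewrite | github.com/OGWJ/twitter-sentiment-analysis | middleware.py | is_valid_query
-- ===== SOURCE A (Python) =====
-- def is_valid_query(query):
--
--     if len(query) > 500 or len(query) < 1:
--         return False
--
--     # TODO: check operators, add more invalid chars
--     #       maybe use whitelist instead of blacklist
--
--     invalid_chars = '^*'
--
--     for i, char in enumerate(query):
--         if char in invalid_chars:
--             return False
--         # check for leading spaces
--         elif i == 0 and char == ' ':
--             return False
--         # check for trailing spaces
--         elif i == len(query) - 1 and char == ' ':
--             return False
--         #check for double spaces
--         elif char == ' ':
--             # check for double spaces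
--             if i < len(query) and query[i+1] == ' ':
--                 return False
--
--     return True
-- ===== SOURCE B (Python) =====
-- def is_valid_query(query):
--     if len(query) > 500 or len(query) < 1:
--         return False
--     return ('^' not in query and '*' not in query
--             and not query.startswith(' ') and not query.endswith(' ')
--             and '  ' not in query)
-- ===== Notes on version B (the rewrite author's own statement) =====
-- stated objective: simpler
-- what changed: Replaced the single enumerate-indexed character scan with branch chains by a short-circuited conjunction of independent library-level string checks (membership, startswith/endswith, double-space substring).
import Mathlib
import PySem

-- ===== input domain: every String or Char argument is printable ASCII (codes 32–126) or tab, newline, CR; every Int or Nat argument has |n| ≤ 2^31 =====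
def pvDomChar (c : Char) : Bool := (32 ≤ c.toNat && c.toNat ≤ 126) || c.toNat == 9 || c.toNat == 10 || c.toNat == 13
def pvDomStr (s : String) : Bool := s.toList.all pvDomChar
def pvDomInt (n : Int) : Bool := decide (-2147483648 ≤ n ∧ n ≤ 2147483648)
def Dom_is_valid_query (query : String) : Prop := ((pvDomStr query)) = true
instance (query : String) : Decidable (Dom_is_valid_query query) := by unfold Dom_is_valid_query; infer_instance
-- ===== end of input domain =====

-- B replaces A's single indexed scan by a conjunction of independent library string checks (simpler).

-- ===== PORT A =====
def pvInvalidChars : List Char := ['^', '*']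

-- the per-character loop of A; the pyGetD default 'x' is never read: when i = n-1 and the
-- char is a space the previous (trailing-space) branch has already returned, so i+1 < n there
def pvLoopA (q : List Char) (n : Int) : List (Int × Char) → Bool
  | [] => true
  | (i, c) :: rest =>
    if pvInvalidChars.contains c then false
    else if i == 0 && c == ' ' then false
    else if i == n - 1 && c == ' ' then false
    else if c == ' ' then
      (if i < n && (PySem.List.pyGetD q (i + 1) 'x' == ' ') then false else pvLoopA q n rest)
    else pvLoopA q n rest

def is_valid_query (query : String) : Bool :=
  let n := PySem.Str.len query
  if n > 500 ∨ n < 1 then false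
  else pvLoopA query.toList n (PySem.List.enumerate query.toList 0)

-- ===== PORT B =====
def is_valid_query_alt (query : String) : Bool :=
  if PySem.Str.len query > 500 ∨ PySem.Str.len query < 1 then false
  else !(PySem.Str.isIn "^" query) && !(PySem.Str.isIn "*" query)
       && !(PySem.Str.startswith query " ") && !(PySem.Str.endswith query " ")
       && !(PySem.Str.isIn "  " query)

-- ===== PRECONDITION & SPEC =====
def Spec_is_valid_query (query : String) (out : Bool) : Prop := out = is_valid_query_alt query
instance (query : String) (out : Bool) : Decidable (Spec_is_valid_query query out) := by unfold Spec_is_valid_query; infer_instance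

-- ===== CLAIM (what is proved, stated in full; the proofs are below) =====
def Claim_equal_is_valid_query : Prop := ∀ (query : String), Dom_is_valid_query query → Spec_is_valid_query query (is_valid_query query)

-- ===== LEMMAS AND PROOFS =====

-- the per-element check A's loop applies, extracted as a predicate
def pvOk (q : List Char) (n : Int) (i : Int) (c : Char) : Bool :=
  !(pvInvalidChars.contains c) && !(i == 0 && c == ' ') && !(i == n - 1 && c == ' ')
  && !(c == ' ' && (decide (i < n) && (PySem.List.pyGetD q (i + 1) 'x' == ' ')))

theorem pvLoopA_eq_all (q : List Char) (n : Int) (ps : List (Int × Char)) :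
    pvLoopA q n ps = ps.all (fun p => pvOk q n p.1 p.2) := by
  induction ps with
  | nil => rfl
  | cons p rest ih =>
    obtain ⟨i, c⟩ := p
    simp only [pvLoopA, pvOk, List.all_cons]
    split_ifs with h1 h2 h3 h4 h5 <;> simp_all [pvOk]
    intro _
    rcases lt_or_ge i n with hlt | hge
    · exact Or.inr (h5 hlt)
    · exact Or.inl hge

-- Prop form of the per-index check A applies at index k
def pvOkP (l : List Char) (k : Nat) (h : k < l.length) : Prop :=
  l[k] ∉ pvInvalidChars ∧ ¬(k = 0 ∧ l[k] = ' ') ∧ ¬((k : Int) = (l.length : Int) - 1 ∧ l[k] = ' ')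
  ∧ ¬(l[k] = ' ' ∧ l.getD (k + 1) 'x' = ' ')

-- the common specification both programs decide on a nonempty string
def pvQ (l : List Char) : Prop :=
  '^' ∉ l ∧ '*' ∉ l ∧ l.head? ≠ some ' ' ∧ l.getLast? ≠ some ' '
  ∧ ¬∃ j : Nat, l[j]? = some ' ' ∧ l[j + 1]? = some ' '

theorem pvOk_iff (l : List Char) (k : Nat) (h : k < l.length) :
    pvOk l (l.length : Int) (k : Int) l[k] = true ↔ pvOkP l k h := by
  have hc : ((k : Int) + 1) = ((k + 1 : Nat) : Int) := by push_cast; ring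
  have hlt : ((k : Int) < (l.length : Int)) := by exact_mod_cast h
  rw [pvOk, hc, PySem.List.pyGetD_natCast]
  simp [pvOkP, hlt]
  tauto

theorem pvA_all_iff (l : List Char) :
    (((PySem.List.enumerate l 0).all fun p => pvOk l (l.length : Int) p.1 p.2) = true) ↔
      ∀ (k : Nat) (h : k < l.length), pvOkP l k h := by
  simp only [List.all_eq_true, PySem.List.mem_enumerate_iff]
  constructor
  · intro hall k h
    have := hall ((0 : Int) + k, l[k]) ⟨k, h, rfl⟩
    rw [← pvOk_iff l k h]
    simpa using this
  · rintro hq p ⟨k, h, rfl⟩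
    simpa using (pvOk_iff l k h).mpr (hq k h)

theorem pvOkP_iff_Q (l : List Char) (hne : l ≠ []) :
    (∀ (k : Nat) (h : k < l.length), pvOkP l k h) ↔ pvQ l := by
  have h0 : 0 < l.length := List.length_pos_iff.mpr hne
  constructor
  · intro hall
    refine ⟨?_, ?_, ?_, ?_, ?_⟩
    · intro hm
      obtain ⟨k, h, hk⟩ := List.getElem_of_mem hm
      exact (hall k h).1 (by simp [pvInvalidChars, hk])
    · intro hm
      obtain ⟨k, h, hk⟩ := List.getElem_of_mem hm
      exact (hall k h).1 (by simp [pvInvalidChars, hk])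
    · intro hh
      have hsp : l[0] = ' ' := by
        rw [List.head?_eq_getElem?, List.getElem?_eq_getElem h0] at hh
        simpa using hh
      exact (hall 0 h0).2.1 ⟨rfl, hsp⟩
    · intro hl
      have hk : l.length - 1 < l.length := by omega
      have hsp : l[l.length - 1] = ' ' := by
        rw [List.getLast?_eq_getElem?, List.getElem?_eq_getElem hk] at hl
        simpa using hl
      exact (hall (l.length - 1) hk).2.2.1 ⟨by omega, hsp⟩
    · rintro ⟨j, hj0, hj1⟩
      obtain ⟨hjl, hj0'⟩ := List.getElem?_eq_some_iff.mp hj0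
      obtain ⟨hj1l, hj1'⟩ := List.getElem?_eq_some_iff.mp hj1
      refine (hall j hjl).2.2.2 ⟨hj0', ?_⟩
      rw [List.getD_eq_getElem l 'x' hj1l]
      exact hj1'
  · intro hq k h
    refine ⟨?_, ?_, ?_, ?_⟩
    · intro hm
      have hmem : l[k] ∈ l := List.getElem_mem h
      rcases (by simpa [pvInvalidChars] using hm : l[k] = '^' ∨ l[k] = '*') with h1 | h1 <;>
        simp_all [pvQ]
    · rintro ⟨rfl, hsp⟩
      exact hq.2.2.1 (by rw [List.head?_eq_getElem?, List.getElem?_eq_getElem h]; simp [hsp])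
    · rintro ⟨hk, hsp⟩
      have hkk : k = l.length - 1 := by omega
      exact hq.2.2.2.1 (by rw [List.getLast?_eq_getElem?, ← hkk, List.getElem?_eq_getElem h]; simp [hsp])
    · rintro ⟨hsp, hg⟩
      by_cases hk1 : k + 1 < l.length
      · exact hq.2.2.2.2 ⟨k, by rw [List.getElem?_eq_getElem h]; simp [hsp],
          by rw [List.getElem?_eq_getElem hk1, ← List.getD_eq_getElem l 'x' hk1, hg]⟩
      · rw [List.getD_eq_default l 'x' (by omega)] at hg
        simp at hg

theorem pv_prefix_space (l : List Char) : [' '] <+: l ↔ l.head? = some ' ' := by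
  cases l with
  | nil => simp
  | cons x t => simp [List.cons_prefix_cons, eq_comm]

theorem pv_suffix_space (l : List Char) : [' '] <:+ l ↔ l.getLast? = some ' ' := by
  rw [← List.reverse_prefix, List.getLast?_eq_head?_reverse]
  cases l.reverse with
  | nil => simp
  | cons x t => simp [List.cons_prefix_cons, eq_comm]

theorem pv_pair_prefix (a b : Char) (m : List Char) :
    [a, b] <+: m ↔ m[0]? = some a ∧ m[1]? = some b := by
  constructor
  · rintro ⟨t, rfl⟩; simp
  · rintro ⟨h0, h1⟩
    match m, h0, h1 with
    | x :: y :: t, h0, h1 => simp_all [List.cons_prefix_cons]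

theorem pv_double_space (l : List Char) :
    PySem.Chars.isIn [' ', ' '] l = true ↔
      ∃ j : Nat, l[j]? = some ' ' ∧ l[j + 1]? = some ' ' := by
  rw [← PySem.Chars.exists_prefix_drop_iff_isIn]
  constructor
  · rintro ⟨j, hj⟩
    rw [pv_pair_prefix] at hj
    exact ⟨j, by simpa [List.getElem?_drop] using hj⟩
  · rintro ⟨j, hj⟩
    exact ⟨j, by rw [pv_pair_prefix]; simpa [List.getElem?_drop] using hj⟩

theorem pvB_iff_Q (l : List Char) :
    ((!(PySem.Chars.isIn ['^'] l) && !(PySem.Chars.isIn ['*'] l)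
      && !(PySem.Chars.startswith l [' ']) && !(PySem.Chars.endswith l [' '])
      && !(PySem.Chars.isIn [' ', ' '] l)) = true) ↔ pvQ l := by
  rw [Bool.and_eq_true, Bool.and_eq_true, Bool.and_eq_true, Bool.and_eq_true]
  rw [Bool.not_eq_true', Bool.not_eq_true', Bool.not_eq_true', Bool.not_eq_true', Bool.not_eq_true']
  rw [PySem.Chars.isIn_eq_false_iff, PySem.Chars.isIn_eq_false_iff,
    List.singleton_infix_iff, List.singleton_infix_iff]
  rw [← Bool.not_eq_true (PySem.Chars.startswith l [' ']), PySem.Chars.startswith_iff, pv_prefix_space]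
  rw [← Bool.not_eq_true (PySem.Chars.endswith l [' ']), PySem.Chars.endswith_iff, pv_suffix_space]
  rw [← Bool.not_eq_true (PySem.Chars.isIn [' ', ' '] l), pv_double_space]
  unfold pvQ
  tauto

-- ===== VERDICT (by name: the statement is the Claim_ definition above) =====
theorem is_valid_query_spec : Claim_equal_is_valid_query := by
  intro query _
  show is_valid_query query = is_valid_query_alt query
  unfold is_valid_query is_valid_query_alt
  simp only [PySem.Str.len_eq]
  split_ifs with hg
  · rfl
  · have hne : query.toList ≠ [] := by
      intro hnil
      simp [hnil] at hg
    rw [pvLoopA_eq_all, Bool.eq_iff_iff, pvA_all_iff, pvOkP_iff_Q _ hne]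
    have hstr : (!PySem.Str.isIn "^" query && !PySem.Str.isIn "*" query
        && !PySem.Str.startswith query " " && !PySem.Str.endswith query " "
        && !PySem.Str.isIn "  " query)
        = (!(PySem.Chars.isIn ['^'] query.toList) && !(PySem.Chars.isIn ['*'] query.toList)
          && !(PySem.Chars.startswith query.toList [' ']) && !(PySem.Chars.endswith query.toList [' '])
          && !(PySem.Chars.isIn [' ', ' '] query.toList)) := by
      simp
    rw [hstr]
    exact (pvB_iff_Q query.toList).symm
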